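-- pv_equiv track=rewrite | github.com/wu709621493/bootcamp | misc/prime_patterns.py | verify_goldbach
-- ===== SOURCE A (Python) =====
-- from dataclasses import dataclass
-- from typing import List, Sequence, Tuple
--
-- def sieve_of_eratosthenes(limit: int) -> List[bool]:
--     """Return a boolean sieve where ``True`` indicates that the index is prime."""
--     if limit < 2:
--         return [False] * (limit + 1)
--     sieve = [True] * (limit + 1)
--     sieve[0] = sieve[1] = False
--     for number in range(2, int(limit ** 0.5) + 1):
--         if sieve[number]:
--             sieve[number * number : limit + 1 : number] = [False] * (
--                 (limit - number * number) // number + 1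
--             )
--     return sieve
--
-- def primes_up_to(limit: int) -> List[int]:
--     """Return a list of all primes up to and including ``limit``."""
--     sieve = sieve_of_eratosthenes(limit)
--     return [index for index, is_prime in enumerate(sieve) if is_prime]
--
-- @dataclass(frozen=True)
-- class GoldbachCounterexample(Exception):
--     """Raised when a counterexample to Goldbach's conjecture is found."""
--
--     even_number: int
--
-- def goldbach_partition(even_number: int, primes: Sequence[int]) -> Tuple[int, int]:
--     """Return one pair of primes whose sum equals ``even_number``.
--
--     A ``GoldbachCounterexample`` is raised if no partition is found.  This does
--     not constitute a proof of the conjecture because only finitely many cases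
--     are checked; it merely performs a computational experiment.
--     """
--     primes_set = set(primes)
--     for prime in primes:
--         complement = even_number - prime
--         if complement < 2:
--             break
--         if complement in primes_set:
--             return prime, complement
--     raise GoldbachCounterexample(even_number)
--
-- def verify_goldbach(limit: int) -> List[Tuple[int, Tuple[int, int]]]:
--     """Verify Goldbach's conjecture for even numbers up to ``limit``.
--
--     Returns a list of tuples ``(n, (p, q))`` documenting one Goldbach partition
--     for each even number checked.
--     """
--     if limit < 4:
--         return []
--     if limit % 2 == 1:
--         limit -= 1
--
--     primes = primes_up_to(limit)
--     partitions: List[Tuple[int, Tuple[int, int]]] = []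
--     for even_number in range(4, limit + 1, 2):
--         partitions.append((even_number, goldbach_partition(even_number, primes)))
--     return partitions
-- ===== SOURCE B (Python) =====
-- from dataclasses import dataclass
-- from typing import List, Tuple
--
--
-- def sieve_of_eratosthenes(limit: int) -> List[bool]:
--     """Return a boolean sieve where ``True`` indicates that the index is prime."""
--     if limit < 2:
--         return [False] * (limit + 1)
--     sieve = [True] * (limit + 1)
--     sieve[0] = sieve[1] = False
--     for number in range(2, int(limit ** 0.5) + 1):
--         if sieve[number]:
--             sieve[number * number : limit + 1 : number] = [False] * (
--                 (limit - number * number) // number + 1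
--             )
--     return sieve
--
--
-- def primes_up_to(limit: int) -> List[int]:
--     """Return a list of all primes up to and including ``limit``."""
--     sieve = sieve_of_eratosthenes(limit)
--     return [index for index, is_prime in enumerate(sieve) if is_prime]
--
--
-- @dataclass(frozen=True)
-- class GoldbachCounterexample(Exception):
--     even_number: int
--
--
-- def verify_goldbach(limit: int) -> List[Tuple[int, Tuple[int, int]]]:
--     """Verify Goldbach's conjecture for even numbers up to ``limit``.
--
--     Instead of scanning the prime list once per even number, build one table
--     mapping each sum p + q (p, q prime, p <= q, taken in ascending order of p
--     then q) to its first-written partition; first write wins, which is the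
--     partition with the smallest prime.  A countdown of still-unfilled even
--     sums lets the table construction stop as soon as every even number in
--     range has a partition.
--     """
--     if limit < 4:
--         return []
--     if limit % 2 == 1:
--         limit -= 1
--
--     primes = primes_up_to(limit)
--     table = {}
--     need = limit // 2 - 1  # even numbers 4, 6, ..., limit not yet in the table
--     for i, p in enumerate(primes):
--         if need == 0:
--             break
--         for q in primes[i:]:
--             s = p + q
--             if s > limit:
--                 break
--             if s not in table:
--                 table[s] = (p, q)
--                 if s % 2 == 0:
--                     need -= 1
--
--     result: List[Tuple[int, Tuple[int, int]]] = []
--     for even_number in range(4, limit + 1, 2):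
--         if even_number not in table:
--             raise GoldbachCounterexample(even_number)
--         result.append((even_number, table[even_number]))
--     return result
-- ===== Notes on version B (the rewrite author's own statement) =====
-- stated objective: faster
-- what changed: Instead of scanning the prime list (and rebuilding set(primes)) once per even number, B builds one first-write-wins table of prime sums p+q (p ascending, q >= p, stopping a row past limit and stopping entirely once every even number in range is covered) and then reads each even number's partition out of the table.
import Mathlib
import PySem

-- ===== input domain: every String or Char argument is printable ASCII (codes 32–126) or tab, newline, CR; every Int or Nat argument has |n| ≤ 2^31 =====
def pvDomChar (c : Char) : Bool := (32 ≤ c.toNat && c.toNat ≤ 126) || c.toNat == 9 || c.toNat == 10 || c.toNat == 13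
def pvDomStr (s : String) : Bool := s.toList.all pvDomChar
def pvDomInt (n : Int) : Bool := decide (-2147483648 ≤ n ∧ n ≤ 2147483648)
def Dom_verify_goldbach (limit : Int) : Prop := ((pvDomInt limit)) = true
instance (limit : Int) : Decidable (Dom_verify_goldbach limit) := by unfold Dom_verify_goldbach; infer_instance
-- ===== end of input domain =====

-- B replaces A's per-even-number scan (which rebuilds set(primes) for every even number) by one
-- first-write-wins table of prime sums with an early exit (A rebuilds set(primes) for every even number — B avoids that rescan); return values only
-- (GoldbachCounterexample, raised by neither program on any even number in Dom, is modelled as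
-- truncating the result list at the failing even number, identically in both ports).

-- ===== PORT A =====
-- sieve[n*n : limit+1 : n] = [False] * ((limit - n*n)//n + 1): the right-hand side's length equals
-- the slice's length, so the assignment sets exactly the indices range(n*n, limit+1, n) to False (exact).
def pvSliceFalse (limit : Int) (sv : List Bool) (number : Int) : List Bool :=
  (PySem.List.pyRange (number * number) (limit + 1) number).foldl
    (fun s j => s.set j.toNat false) sv

-- int(limit ** 0.5) = Nat.sqrt limit.toNat for 0 ≤ limit ≤ 2^31 (IEEE sqrt is exactly rounded and
-- limit fits a double there); sieve[number] with 2 ≤ number < len(sieve) is a plain in-range get.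
def sieve_of_eratosthenes (limit : Int) : List Bool :=
  if limit < 2 then List.replicate (limit + 1).toNat false
  else
    (PySem.List.pyRange 2 ((Nat.sqrt limit.toNat : Int) + 1) 1).foldl
      (fun sv number => if sv.getD number.toNat false then pvSliceFalse limit sv number else sv)
      (((List.replicate (limit + 1).toNat true).set 0 false).set 1 false)

def primes_up_to (limit : Int) : List Int :=
  (PySem.List.enumerate (sieve_of_eratosthenes limit)).filterMap
    (fun iv => if iv.2 then some iv.1 else none)

-- goldbach_partition: 'raise GoldbachCounterexample' is modelled as none
def pvGpLoop (even_number : Int) (primesSet : PySem.Set Int) : List Int → Option (Int × Int)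
  | [] => none
  | p :: rest =>
    let complement := even_number - p
    if complement < 2 then none
    else if PySem.Set.contains primesSet complement then some (p, complement)
    else pvGpLoop even_number primesSet rest

def goldbach_partition (even_number : Int) (primes : List Int) : Option (Int × Int) :=
  pvGpLoop even_number (PySem.Set.ofList primes) primes

-- the loop of verify_goldbach; a raised GoldbachCounterexample aborts the call = truncates here
def pvALoop (primes : List Int) : List Int → List (Int × (Int × Int)) → List (Int × (Int × Int))
  | [], acc => acc.reverse
  | n :: rest, acc =>
    match goldbach_partition n primes with
    | none => acc.reverse
    | some pr => pvALoop primes rest ((n, pr) :: acc)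

def verify_goldbach (limit : Int) : List (Int × (Int × Int)) :=
  if limit < 4 then []
  else
    let lim := if PySem.Int.mod limit 2 == 1 then limit - 1 else limit
    pvALoop (primes_up_to lim) (PySem.List.pyRange 4 (lim + 1) 2) []

-- ===== PORT B =====
-- Source B copies sieve_of_eratosthenes / primes_up_to from A's module verbatim, so the ports above
-- serve both sides.
def pvInner (limit p : Int) : List Int → PySem.Dict Int (Int × Int) × Int →
    PySem.Dict Int (Int × Int) × Int
  | [], st => st
  | q :: rest, st =>
    let s := p + q
    if limit < s then st  -- 'if s > limit: break'
    else if st.1.contains s then pvInner limit p rest st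
    else pvInner limit p rest
      (st.1.insert s (p, q), if PySem.Int.mod s 2 == 0 then st.2 - 1 else st.2)

-- 'for i, p in enumerate(primes): … for q in primes[i:]': primes[i:] is p :: rest, so the outer
-- loop is recursion on the tails of primes
def pvOuter (limit : Int) : List Int → PySem.Dict Int (Int × Int) × Int →
    PySem.Dict Int (Int × Int) × Int
  | [], st => st
  | p :: rest, st =>
    if st.2 == 0 then st  -- 'if need == 0: break'
    else pvOuter limit rest (pvInner limit p (p :: rest) st)

-- final sweep; 'if even_number not in table: raise' + 'table[even_number]' together are get?
def pvBLoop (table : PySem.Dict Int (Int × Int)) :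
    List Int → List (Int × (Int × Int)) → List (Int × (Int × Int))
  | [], acc => acc.reverse
  | n :: rest, acc =>
    match table.get? n with
    | none => acc.reverse  -- raise GoldbachCounterexample: truncation, as in port A
    | some pr => pvBLoop table rest ((n, pr) :: acc)

def verify_goldbach_alt (limit : Int) : List (Int × (Int × Int)) :=
  if limit < 4 then []
  else
    let lim := if PySem.Int.mod limit 2 == 1 then limit - 1 else limit
    let primes := primes_up_to lim
    let table := (pvOuter lim primes (PySem.Dict.empty, PySem.Int.floordiv lim 2 - 1)).1
    pvBLoop table (PySem.List.pyRange 4 (lim + 1) 2) []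

-- ===== PRECONDITION & SPEC =====
def Spec_verify_goldbach (limit : Int) (out : List (Int × (Int × Int))) : Prop := out = verify_goldbach_alt limit
instance (limit : Int) (out : List (Int × (Int × Int))) : Decidable (Spec_verify_goldbach limit out) := by unfold Spec_verify_goldbach; infer_instance

-- ===== CLAIM (what is proved, stated in full; the proofs are below) =====
def Claim_equal_verify_goldbach : Prop := ∀ (limit : Int), Dom_verify_goldbach limit → Spec_verify_goldbach limit (verify_goldbach limit)

-- ===== LEMMAS AND PROOFS =====

-- number of even values 4..limit still missing from the table (the meaning of Source B's 'need')
def pvMissing (L : Int) (t : PySem.Dict Int (Int × Int)) : Nat :=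
  ((PySem.List.pyRange 4 (L + 1) 2).filter (fun n => !(t.get? n).isSome)).length

-- the pairs one inner pass over qs (with first element p) contributes for key k
def pvBlockFind (L p : Int) (qs : List Int) (k : Int) : Option (Int × Int) :=
  ((qs.takeWhile (fun q => decide (p + q ≤ L))).find? (fun q => decide (p + q = k))).map
    (fun q => (p, q))

-- the first pair of the whole (p, q) stream with sum k
def pvStreamFind (L : Int) : List Int → Int → Option (Int × Int)
  | [], _ => none
  | p :: rest, k => (pvBlockFind L p (p :: rest) k).or (pvStreamFind L rest k)

theorem pv_foldl_set_false_true {js : List Int} {l : List Bool} {k : Nat}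
    (h : (js.foldl (fun s j => s.set j.toNat false) l)[k]? = some true) : l[k]? = some true := by
  induction js generalizing l with
  | nil => simpa using h
  | cons j js ih =>
    have h' := ih h
    rw [List.getElem?_set] at h'
    split at h' <;> [skip; exact h']
    split at h' <;> simp_all

theorem pv_sieve_true_ge_two {L : Int} (hL : 2 ≤ L) {k : Nat}
    (h : (sieve_of_eratosthenes L)[k]? = some true) : 2 ≤ k := by
  rw [sieve_of_eratosthenes, if_neg (by omega)] at h
  -- reduce to the initial list
  have h0 : ∀ (js : List Int) (l : List Bool),
      ((js.foldl (fun sv number => if sv.getD number.toNat false then pvSliceFalse L sv number else sv) l)[k]? = some true) → l[k]? = some true := by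
    intro js
    induction js with
    | nil => intro l h; simpa using h
    | cons j js ih =>
      intro l h
      have h' := ih _ h
      simp only at h'
      by_cases hc : l.getD j.toNat false = true
      · rw [if_pos hc] at h'
        exact pv_foldl_set_false_true (js := PySem.List.pyRange (j*j) (L+1) j) h'
      · rwa [if_neg hc] at h'
  have h1 := h0 _ _ h
  by_contra hk
  have hlen : (((List.replicate (L + 1).toNat true).set 0 false).set 1 false).length = (L+1).toNat := by
    simp
  interval_cases k <;> rw [List.getElem?_set, List.getElem?_set] at h1 <;> simp_all

theorem pv_primes_ge_two {L : Int} (hL : 2 ≤ L) : ∀ x ∈ primes_up_to L, 2 ≤ x := by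
  intro x hx
  rw [primes_up_to, List.mem_filterMap] at hx
  obtain ⟨iv, hmem, hif⟩ := hx
  rw [PySem.List.mem_enumerate_iff] at hmem
  obtain ⟨k, hk, rfl⟩ := hmem
  by_cases hb : (sieve_of_eratosthenes L)[k] = true
  · have h2 : 2 ≤ k := pv_sieve_true_ge_two hL (by rw [List.getElem?_eq_getElem hk, hb])
    simp only [hb, if_pos] at hif
    cases hif
    simp; omega
  · simp only at hif
    rw [if_neg hb] at hif; cases hif

theorem pv_primes_sorted (L : Int) : (primes_up_to L).Pairwise (· < ·) := by
  rw [primes_up_to, List.pairwise_filterMap]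
  refine (PySem.List.pairwise_lt_enumerate _ _).imp ?_
  intro a a' h b hb b' hb'
  split at hb <;> cases hb
  split at hb' <;> cases hb'
  exact h

theorem pv_gp_eq_find (n : Int) (P : List Int) (hP2 : ∀ x ∈ P, 2 ≤ x) :
    ∀ T : List Int, T.Pairwise (· < ·) → (∀ x ∈ T, 2 ≤ x) →
    pvGpLoop n (PySem.Set.ofList P) T
      = (T.find? (fun p => decide ((n - p) ∈ P))).map (fun p => (p, n - p)) := by
  intro T
  induction T with
  | nil => intro _ _; rfl
  | cons p rest ih =>
    intro hsort hge
    rw [pvGpLoop]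
    by_cases hlt : n - p < 2
    · rw [if_pos hlt]
      have hnone : (p :: rest).find? (fun p => decide ((n - p) ∈ P)) = none := by
        rw [List.find?_eq_none]
        intro x hx
        have hpx : p ≤ x := by
          rcases List.mem_cons.mp hx with rfl | hx'
          · exact le_refl x
          · exact le_of_lt ((List.pairwise_cons.mp hsort).1 x hx')
        simp only [decide_eq_true_eq]
        intro hmem
        have := hP2 _ hmem
        omega
      rw [hnone]; rfl
    · rw [if_neg hlt]
      by_cases hmem : (n - p) ∈ P
      · rw [if_pos (by rw [PySem.Set.contains_iff, PySem.Set.mem_ofList]; exact hmem)]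
        rw [List.find?_cons_of_pos (by simpa using hmem)]
        rfl
      · rw [if_neg (by rw [PySem.Set.contains_iff, PySem.Set.mem_ofList]; exact hmem)]
        rw [List.find?_cons_of_neg (by simpa using hmem)]
        exact ih (List.pairwise_cons.mp hsort).2 (fun x hx => hge x (List.mem_cons_of_mem _ hx))

theorem pv_inner_get? (L p : Int) (qs : List Int) :
    ∀ (st : PySem.Dict Int (Int × Int) × Int) (k : Int),
    ((pvInner L p qs st).1).get? k = (st.1.get? k).or (pvBlockFind L p qs k) := by
  induction qs with
  | nil => intro st k; simp [pvInner, pvBlockFind]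
  | cons q rest ih =>
    intro st k
    rw [pvInner]
    by_cases hbr : L < p + q
    · rw [if_pos hbr]
      have : pvBlockFind L p (q :: rest) k = none := by
        simp [pvBlockFind, hbr]
      simp [this]
    · rw [if_neg hbr]
      have htw : pvBlockFind L p (q :: rest) k
          = ((q :: (rest.takeWhile (fun q => decide (p + q ≤ L)))).find?
              (fun q => decide (p + q = k))).map (fun q => (p, q)) := by
        simp [pvBlockFind, not_lt.mp hbr]
      by_cases hct : st.1.contains (p + q)
      · rw [if_pos hct]
        rw [ih st k]
        by_cases hks : p + q = k
        · -- st has entry at k, both sides st.get? k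
          have hsome : (st.1.get? k).isSome := by
            rw [← hks, ← PySem.Dict.contains_eq_isSome_get?]; exact hct
          obtain ⟨v, hv⟩ := Option.isSome_iff_exists.mp hsome
          simp [hv]
        · rw [htw, List.find?_cons_of_neg (by simpa using hks)]
          rfl
      · rw [if_neg hct]
        rw [ih _ k]
        have hget : st.1.get? (p + q) = none := by
          have := PySem.Dict.contains_eq_isSome_get? st.1 (p + q)
          rw [Bool.eq_false_iff.mpr hct] at this
          exact Option.not_isSome_iff_eq_none.mp (by rw [← this]; simp)
        by_cases hks : p + q = k
        · subst hks
          rw [PySem.Dict.get?_insert, if_pos rfl, hget]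
          rw [htw, List.find?_cons_of_pos (by simp)]
          simp
        · rw [PySem.Dict.get?_insert, if_neg (fun h => hks h.symm)]
          rw [htw, List.find?_cons_of_neg (by simpa using hks)]
          rfl

theorem pv_filter_len_succ {l : List Int} {f g : Int → Bool} {s : Int}
    (hnd : l.Nodup) (hs : s ∈ l) (hf : f s = true) (hg : g s = false)
    (hag : ∀ n, n ≠ s → g n = f n) :
    (l.filter f).length = (l.filter g).length + 1 := by
  induction l with
  | nil => cases hs
  | cons x xs ih =>
    rcases List.mem_cons.mp hs with rfl | hx
    · have hnot : s ∉ xs := (List.nodup_cons.mp hnd).1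
      have : xs.filter f = xs.filter g := by
        apply List.filter_congr
        intro n hn
        exact (hag n (fun h => hnot (h ▸ hn))).symm
      simp [hf, hg, this]
    · have hxs : x ≠ s := fun h => (List.nodup_cons.mp hnd).1 (h ▸ hx)
      have := ih (List.nodup_cons.mp hnd).2 hx
      simp only [List.filter_cons, hag x hxs]
      split <;> simp [this]

theorem pv_range_nodup (L : Int) : (PySem.List.pyRange 4 (L + 1) 2).Nodup := by
  rw [PySem.List.pyRange_of_pos _ _ (by norm_num)]
  exact (List.nodup_range).map (fun a b h => by omega)

theorem pv_inner_inv (L p : Int) (hp : 2 ≤ p) :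
    ∀ (qs : List Int) (st : PySem.Dict Int (Int × Int) × Int), (∀ q ∈ qs, 2 ≤ q) →
    st.2 = (pvMissing L st.1 : Int) →
    (pvInner L p qs st).2 = (pvMissing L (pvInner L p qs st).1 : Int) := by
  intro qs
  induction qs with
  | nil => intro st _ h; exact h
  | cons q rest ih =>
    intro st hge hinv
    have hq2 : 2 ≤ q := hge q (List.mem_cons_self ..)
    rw [pvInner]
    by_cases hbr : L < p + q
    · rw [if_pos hbr]; exact hinv
    · rw [if_neg hbr]
      by_cases hct : st.1.contains (p + q)
      · rw [if_pos hct]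
        exact ih st (fun x hx => hge x (List.mem_cons_of_mem _ hx)) hinv
      · rw [if_neg hct]
        apply ih _ (fun x hx => hge x (List.mem_cons_of_mem _ hx))
        have hget : st.1.get? (p + q) = none := by
          have := PySem.Dict.contains_eq_isSome_get? st.1 (p + q)
          rw [Bool.eq_false_iff.mpr hct] at this
          exact Option.not_isSome_iff_eq_none.mp (by rw [← this]; simp)
        by_cases hev : 2 ∣ (p + q)
        · -- even sum: it is in the range and missing decreases by one
          have hm : PySem.Int.mod (p + q) 2 == 0 := by
            rw [PySem.Int.mod_eq_emod_of_pos (by norm_num)]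
            simp only [beq_iff_eq]
            omega
          have hmem : (p + q) ∈ PySem.List.pyRange 4 (L + 1) 2 := by
            rw [PySem.List.mem_pyRange_iff_of_pos (by norm_num)]
            refine ⟨by omega, by omega, by omega⟩
          have hlen : (pvMissing L st.1) = (pvMissing L (st.1.insert (p + q) (p, q))) + 1 := by
            apply pv_filter_len_succ (pv_range_nodup L) hmem
            · simp [hget]
            · simp [PySem.Dict.get?_insert_self]
            · intro n hn
              simp [PySem.Dict.get?_insert, if_neg hn]
          simp only [hm, if_pos]
          rw [hinv, hlen]
          push_cast
          ring
        · -- odd sum: no even entry changes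
          have hm : ¬ (PySem.Int.mod (p + q) 2 == 0) = true := by
            rw [PySem.Int.mod_eq_emod_of_pos (by norm_num)]
            simp
            omega
          rw [if_neg hm]
          have : pvMissing L ((st.1.insert (p + q) (p, q))) = pvMissing L st.1 := by
            unfold pvMissing
            congr 1
            apply List.filter_congr
            intro n hn
            rw [PySem.List.mem_pyRange_iff_of_pos (by norm_num)] at hn
            have hne : n ≠ p + q := by rintro rfl; omega
            simp [PySem.Dict.get?_insert, if_neg hne]
          rw [this]; exact hinv

theorem pv_outer_get? (L : Int) :
    ∀ (T : List Int) (st : PySem.Dict Int (Int × Int) × Int) (k : Int),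
    (∀ x ∈ T, 2 ≤ x) → st.2 = (pvMissing L st.1 : Int) →
    4 ≤ k → k ≤ L → 2 ∣ k - 4 →
    ((pvOuter L T st).1).get? k = (st.1.get? k).or (pvStreamFind L T k) := by
  intro T
  induction T with
  | nil => intro st k _ _ _ _ _; simp [pvOuter, pvStreamFind]
  | cons p rest ih =>
    intro st k hge hinv hk4 hkL hkd
    rw [pvOuter]
    by_cases hz : st.2 == 0
    · rw [if_pos hz]
      -- missing = 0, so k already has an entry; the .or collapses
      have hm0 : pvMissing L st.1 = 0 := by
        have : st.2 = (0 : Int) := by simpa using hz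
        omega
      have hmem : k ∈ PySem.List.pyRange 4 (L + 1) 2 := by
        rw [PySem.List.mem_pyRange_iff_of_pos (by norm_num)]
        exact ⟨hk4, by omega, hkd⟩
      have hsome : (st.1.get? k).isSome := by
        by_contra hn
        have : (fun n => !(st.1.get? n).isSome) k = true := by
          simpa using hn
        have hmem2 : k ∈ (PySem.List.pyRange 4 (L + 1) 2).filter
            (fun n => !(st.1.get? n).isSome) := List.mem_filter.mpr ⟨hmem, this⟩
        rw [pvMissing] at hm0
        rw [List.length_eq_zero_iff] at hm0
        rw [hm0] at hmem2
        cases hmem2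
      obtain ⟨v, hv⟩ := Option.isSome_iff_exists.mp hsome
      simp [hv]
    · rw [if_neg hz]
      have hp2 : 2 ≤ p := hge p (List.mem_cons_self ..)
      have hinv' := pv_inner_inv L p hp2 (p :: rest) st hge hinv
      rw [ih _ k (fun x hx => hge x (List.mem_cons_of_mem _ hx)) hinv' hk4 hkL hkd]
      rw [pv_inner_get?]
      rw [pvStreamFind]
      exact (Option.or_assoc ..).symm ▸ rfl

theorem pv_takeWhile_find {L p k : Int} (hkL : k ≤ L) :
    ∀ qs : List Int, qs.Pairwise (· < ·) → (k - p) ∈ qs →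
    ((qs.takeWhile (fun q => decide (p + q ≤ L))).find? (fun q => decide (p + q = k)))
      = some (k - p) := by
  intro qs
  induction qs with
  | nil => intro _ h; cases h
  | cons q rest ih =>
    intro hsort hmem
    by_cases hq : q = k - p
    · subst hq
      rw [List.takeWhile_cons_of_pos (by simp only [decide_eq_true_eq]; omega)]
      rw [List.find?_cons_of_pos (by simp only [decide_eq_true_eq]; omega)]
    · have hmem' : (k - p) ∈ rest := by
        rcases List.mem_cons.mp hmem with h | h
        · exact absurd h.symm hq
        · exact h
      have hlt : q < k - p := (List.pairwise_cons.mp hsort).1 _ hmem'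
      rw [List.takeWhile_cons_of_pos (by simp only [decide_eq_true_eq]; omega)]
      rw [List.find?_cons_of_neg (by simp only [decide_eq_true_eq]; omega)]
      exact ih (List.pairwise_cons.mp hsort).2 hmem'

theorem pv_stream_eq_find {L : Int} {P : List Int} (hsort : P.Pairwise (· < ·))
    (hP2 : ∀ x ∈ P, 2 ≤ x) {k : Int} (hkL : k ≤ L) :
    ∀ (T pre : List Int), P = pre ++ T → (∀ p ∈ pre, (k - p) ∉ P) →
    pvStreamFind L T k
      = (T.find? (fun p => decide ((k - p) ∈ P))).map (fun p => (p, k - p)) := by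
  intro T
  induction T with
  | nil => intro pre _ _; rfl
  | cons p rest ih =>
    intro pre hPeq hpre
    have hpP : p ∈ P := by rw [hPeq]; simp
    have hTsort : (p :: rest).Pairwise (· < ·) := by
      have := hPeq ▸ hsort
      exact (List.pairwise_append.mp this).2.1
    rw [pvStreamFind]
    by_cases hmem : (k - p) ∈ P
    · -- the first block hits
      have hq0T : (k - p) ∈ p :: rest := by
        rcases (by rw [hPeq] at hmem; exact List.mem_append.mp hmem) with h | h
        · exact absurd hpP (by simpa using hpre _ h)
        · exact h
      have hb : pvBlockFind L p (p :: rest) k = some (p, k - p) := by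
        rw [pvBlockFind, pv_takeWhile_find hkL _ hTsort hq0T]
        rfl
      rw [hb, List.find?_cons_of_pos (by simpa using hmem)]
      rfl
    · -- the first block misses
      have hb : pvBlockFind L p (p :: rest) k = none := by
        rw [pvBlockFind]
        rw [Option.map_eq_none_iff, List.find?_eq_none]
        intro q hq hpq
        apply hmem
        have hqT : q ∈ p :: rest := (List.takeWhile_sublist _).subset hq
        have : q ∈ P := by rw [hPeq]; exact List.mem_append_right _ hqT
        have : k - p = q := by simp at hpq; omega
        rwa [this]
      rw [hb, List.find?_cons_of_neg (by simpa using hmem)]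
      simp only [Option.none_or]
      refine ih (pre ++ [p]) (by rw [hPeq]; simp) ?_
      intro x hx
      rcases List.mem_append.mp hx with h | h
      · exact hpre x h
      · simp at h; subst h; exact hmem

theorem pv_missing_empty {L : Int} (hL : 4 ≤ L) (hLe : 2 ∣ L) :
    PySem.Int.floordiv L 2 - 1 = (pvMissing L PySem.Dict.empty : Int) := by
  rw [PySem.Int.floordiv_eq_ediv_of_pos (by norm_num)]
  rw [pvMissing]
  have : ∀ n : Int, (!((PySem.Dict.empty : PySem.Dict Int (Int × Int)).get? n).isSome) = true := by
    intro n; simp [PySem.Dict.get?_empty]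
  rw [List.filter_eq_self.mpr (fun a _ => this a)]
  rw [PySem.List.pyRange_of_pos _ _ (by norm_num)]
  rw [List.length_map, List.length_range]
  rw [if_pos (by omega)]
  omega

theorem pv_sweep_eq (P : List Int) (table : PySem.Dict Int (Int × Int))
    (ns : List Int) (h : ∀ n ∈ ns, goldbach_partition n P = table.get? n) :
    ∀ acc, pvALoop P ns acc = pvBLoop table ns acc := by
  induction ns with
  | nil => intro acc; rfl
  | cons n rest ih =>
    intro acc
    rw [pvALoop, pvBLoop, ← h n (List.mem_cons_self ..)]
    cases goldbach_partition n P with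
    | none => rfl
    | some pr => exact ih (fun m hm => h m (List.mem_cons_of_mem _ hm)) _

-- ===== VERDICT (by name: the statement is the Claim_ definition above) =====
theorem verify_goldbach_spec : Claim_equal_verify_goldbach := by
  intro limit _
  unfold Spec_verify_goldbach
  rw [verify_goldbach, verify_goldbach_alt]
  by_cases h4 : limit < 4
  · rw [if_pos h4, if_pos h4]
  · rw [if_neg h4, if_neg h4]
    simp only
    set L := if PySem.Int.mod limit 2 == 1 then limit - 1 else limit with hLdef
    have hL : 4 ≤ L ∧ 2 ∣ L := by
      rw [hLdef, PySem.Int.mod_eq_emod_of_pos (b := 2) (by norm_num)]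
      by_cases hm : limit % 2 == 1
      · rw [if_pos hm]; simp only [beq_iff_eq] at hm; omega
      · rw [if_neg hm]; simp only [beq_iff_eq] at hm; omega
    apply pv_sweep_eq
    intro n hn
    rw [PySem.List.mem_pyRange_iff_of_pos (by norm_num)] at hn
    obtain ⟨hn4, hnL, hnd⟩ := hn
    have hsort := pv_primes_sorted L
    have hP2 := pv_primes_ge_two (L := L) (by omega)
    rw [goldbach_partition, pv_gp_eq_find n (primes_up_to L) hP2 _ hsort hP2]
    rw [pv_outer_get? L (primes_up_to L) _ n hP2 (pv_missing_empty hL.1 hL.2) hn4 (by omega) hnd]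
    rw [PySem.Dict.get?_empty, Option.none_or]
    rw [pv_stream_eq_find hsort hP2 (by omega) (primes_up_to L) [] rfl (by simp)]
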